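-- pv_equiv track=rewrite | github.com/julianf125/book-database-platform | Code/utilities.py | adjust_spaces_around_quotes
-- ===== SOURCE A (Python) =====
-- def adjust_spaces_around_quotes(text):
--     # Split the text into segments by quotation marks
--     segments = text.split('"')
--
--     # Initialize an empty list to hold processed segments
--     adjusted_segments = []
--
--     # Flag to track whether the current segment is inside quotes
--     inside_quotes = False
--
--     for i, segment in enumerate(segments):
--         # For segments outside of quotes (even indices), check and adjust the space before the closing quote
--         if not inside_quotes:
--             if i > 0:  # Ensure this is not the first segment
--                 # Remove space at the end if it's before a closing quote
--                 adjusted_segments[-1] = adjusted_segments[-1].rstrip()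
--         else:
--             # For segments inside quotes (odd indices), adjust the space after the opening quote
--             segment = segment.lstrip()
--
--         adjusted_segments.append(segment)
--         inside_quotes = not inside_quotes  # Toggle the inside_quotes flag
--
--     # Join the adjusted segments back together
--     return '"'.join(adjusted_segments)
-- ===== SOURCE B (Python) =====
-- def adjust_spaces_around_quotes(text):
--     # Single pass over the characters: outside quotes copy verbatim; right after an
--     # opening quote skip whitespace; inside quotes buffer whitespace and drop the
--     # buffer when the closing quote arrives (keep it if the text ends first).
--     WS = ' \t\n\r\v\f'
--     out = []
--     pending = []        # buffered whitespace seen inside quotes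
--     inside = False
--     skipping = False    # currently skipping whitespace right after an opening quote
--     for ch in text:
--         if ch == '"':
--             if inside:
--                 pending = []
--             inside = not inside
--             skipping = inside
--             out.append(ch)
--         elif inside:
--             if ch in WS:
--                 if not skipping:
--                     pending.append(ch)
--             else:
--                 skipping = False
--                 out.extend(pending)
--                 pending = []
--                 out.append(ch)
--         else:
--             out.append(ch)
--     out.extend(pending)
--     return ''.join(out)
-- ===== Notes on version B (the rewrite author's own statement) =====
-- stated objective: alternative
-- what changed: A splits the text on '"', strips segment edges in a segment loop with a deferred rstrip of the previously appended segment, and rejoins; B never builds segments: it makes one left-to-right character scan with an inside/skipping state machine that skips whitespace right after an opening quote and buffers inside-quote whitespace, dropping the buffer at a closing quote (keeping it if the text ends unbalanced).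
import Mathlib
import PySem

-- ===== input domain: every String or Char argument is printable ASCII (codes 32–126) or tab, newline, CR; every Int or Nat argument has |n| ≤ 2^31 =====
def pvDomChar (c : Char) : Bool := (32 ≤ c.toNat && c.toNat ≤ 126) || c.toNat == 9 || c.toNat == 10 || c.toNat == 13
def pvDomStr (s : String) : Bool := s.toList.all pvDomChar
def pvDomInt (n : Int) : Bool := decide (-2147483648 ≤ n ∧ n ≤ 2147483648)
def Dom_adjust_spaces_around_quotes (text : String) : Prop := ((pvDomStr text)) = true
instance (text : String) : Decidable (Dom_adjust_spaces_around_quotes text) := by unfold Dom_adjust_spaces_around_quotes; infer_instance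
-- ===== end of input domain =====

-- B replaces A's split-on-quotes / strip-segments / rejoin with a single left-to-right
-- character scan (alternative decomposition, no speed claim).

-- ===== PORT A =====
-- adjusted_segments[-1] = adjusted_segments[-1].rstrip()  (list is nonempty when reached)
def pvModLast : List (List Char) → List (List Char)
  | [] => []
  | [x] => [PySem.Chars.rstrip x]
  | x :: y :: xs => x :: pvModLast (y :: xs)

def adjust_spaces_around_quotes (text : String) : String :=
  -- segments = text.split('"')
  let segments := PySem.Chars.splitOn text.toList ['"']
  -- for i, segment in enumerate(segments): …
  let r := (PySem.List.enumerate segments).foldl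
      (fun (st : List (List Char) × Bool) (p : Int × List Char) =>
        if !st.2 then
          let adj := if p.1 > 0 then pvModLast st.1 else st.1
          (adj ++ [p.2], !st.2)
        else
          (st.1 ++ [PySem.Chars.lstrip p.2], !st.2))
      ([], false)
  -- return '"'.join(adjusted_segments)
  String.ofList (PySem.Chars.join ['"'] r.1)

-- ===== PORT B =====
def pvWS : List Char := [' ', '\t', '\n', '\r', '\x0b', '\x0c']

-- one iteration of B's character loop; state = (out, pending, inside, skipping)
def pvStepB (st : List Char × List Char × Bool × Bool) (ch : Char) :
    List Char × List Char × Bool × Bool :=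
  let (out, pending, inside, skipping) := st
  if ch = '"' then
    let pending := if inside then [] else pending
    (out ++ [ch], pending, !inside, !inside)
  else if inside then
    if pvWS.contains ch then
      (if skipping then (out, pending, inside, skipping)
       else (out, pending ++ [ch], inside, skipping))
    else (out ++ pending ++ [ch], [], inside, false)
  else (out ++ [ch], pending, inside, skipping)

def adjust_spaces_around_quotes_alt (text : String) : String :=
  let st := text.toList.foldl pvStepB ([], [], false, false)
  String.ofList (st.1 ++ st.2.1)

-- ===== PRECONDITION & SPEC =====
def Spec_adjust_spaces_around_quotes (text : String) (out : String) : Prop := out = adjust_spaces_around_quotes_alt text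
instance (text : String) (out : String) : Decidable (Spec_adjust_spaces_around_quotes text out) := by unfold Spec_adjust_spaces_around_quotes; infer_instance

-- ===== CLAIM (what is proved, stated in full; the proofs are below) =====
def Claim_equal_adjust_spaces_around_quotes : Prop := ∀ (text : String), Dom_adjust_spaces_around_quotes text → Spec_adjust_spaces_around_quotes text (adjust_spaces_around_quotes text)

-- ===== LEMMAS AND PROOFS =====

-- B's whitespace test as a predicate
def pvIsWS (c : Char) : Bool := pvWS.contains c

-- B's rstrip / trailing-whitespace split (with B's whitespace set)
def pvRstrip (l : List Char) : List Char := (l.reverse.dropWhile pvIsWS).reverse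
def pvTrail (l : List Char) : List Char := (l.reverse.takeWhile pvIsWS).reverse
def pvLstrip (l : List Char) : List Char := l.dropWhile pvIsWS

-- the value A's loop produces from the segment list (deferred-rstrip characterisation):
-- `some x` = an inside segment x has been appended and will be rstripped iff another follows
def pvTrA : Option (List Char) → List (List Char) → List (List Char)
  | none, [] => []
  | none, s :: rest => pvTrA (some (PySem.Chars.lstrip s)) rest
  | some x, [] => [x]
  | some x, s :: rest => PySem.Chars.rstrip x :: s :: pvTrA none rest

def pvTop : List (List Char) → List (List Char)
  | [] => []
  | s0 :: rest => s0 :: pvTrA none rest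

def pvAList (cs : List Char) : List Char :=
  PySem.Chars.join ['"'] (pvTop (PySem.Chars.splitOn cs ['"']))

-- clean reformulation of PySem.Chars.splitOn.go for sep = ['"']
def pvSplit : List Char → List Char → List (List Char) → List (List Char)
  | [], cur, acc => (cur.reverse :: acc).reverse
  | c :: rest, cur, acc =>
    if c = '"' then pvSplit rest [] (cur.reverse :: acc)
    else pvSplit rest (c :: cur) acc

lemma pv_go_eq (l : List Char) : ∀ fuel cur acc, l.length ≤ fuel →
    PySem.Chars.splitOn.go ['"'] fuel l cur acc = pvSplit l cur acc := by
  induction l with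
  | nil =>
    intro fuel cur acc _
    cases fuel <;> rw [PySem.Chars.splitOn.go] <;> simp [pvSplit]
  | cons c rest ih =>
    intro fuel cur acc hlen
    cases fuel with
    | zero => simp at hlen
    | succ fuel =>
      rw [PySem.Chars.splitOn.go]
      simp only [List.isPrefixOf, List.length_cons] at *
      by_cases hc : c = '"'
      · subst hc
        simp only [BEq.rfl, Bool.and_self, if_pos]
        simp only [pvSplit]
        simpa using ih fuel [] (cur.reverse :: acc) (by omega)
      · have hbe : ('"' == c) = false := by simpa using fun h => hc h.symm
        simp only [hbe, Bool.false_and, if_neg Bool.false_ne_true]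
        simp only [pvSplit, if_neg hc]
        exact ih fuel (c :: cur) acc (by omega)

lemma pvSplit_acc (l : List Char) : ∀ cur acc,
    pvSplit l cur acc = acc.reverse ++ pvSplit l cur [] := by
  induction l with
  | nil => intro cur acc; simp [pvSplit]
  | cons c rest ih =>
    intro cur acc
    by_cases hc : c = '"'
    · simp only [pvSplit, if_pos hc]
      rw [ih [] (cur.reverse :: acc), ih [] [cur.reverse]]
      simp
    · simp only [pvSplit, if_neg hc]
      exact ih (c :: cur) acc

lemma pvSplit_noq (l : List Char) (h : '"' ∉ l) : ∀ cur acc,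
    pvSplit l cur acc = ((cur.reverse ++ l) :: acc).reverse := by
  induction l with
  | nil => intro cur acc; simp [pvSplit]
  | cons c rest ih =>
    intro cur acc
    have hc : c ≠ '"' := fun hc => h (hc ▸ List.mem_cons_self)
    have hr : '"' ∉ rest := fun hr => h (List.mem_cons_of_mem _ hr)
    simp only [pvSplit, if_neg hc]
    rw [ih hr]
    simp

lemma pvSplit_q (a : List Char) (h : '"' ∉ a) : ∀ b cur acc,
    pvSplit (a ++ '"' :: b) cur acc = pvSplit b [] ((cur.reverse ++ a) :: acc) := by
  induction a with
  | nil => intro b cur acc; simp [pvSplit]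
  | cons c rest ih =>
    intro b cur acc
    have hc : c ≠ '"' := fun hc => h (hc ▸ List.mem_cons_self)
    have hr : '"' ∉ rest := fun hr => h (List.mem_cons_of_mem _ hr)
    simp only [List.cons_append, pvSplit, if_neg hc]
    rw [ih hr]
    simp

lemma pv_splitOn_eq (cs : List Char) :
    PySem.Chars.splitOn cs ['"'] = pvSplit cs [] [] := by
  show PySem.Chars.splitOn.go ['"'] (cs.length + 1) cs [] [] = _
  exact pv_go_eq cs (cs.length + 1) [] [] (by omega)

lemma pv_splitOn_noq (cs : List Char) (h : '"' ∉ cs) :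
    PySem.Chars.splitOn cs ['"'] = [cs] := by
  rw [pv_splitOn_eq, pvSplit_noq cs h]
  simp

lemma pv_splitOn_q (a b : List Char) (h : '"' ∉ a) :
    PySem.Chars.splitOn (a ++ '"' :: b) ['"'] = a :: PySem.Chars.splitOn b ['"'] := by
  rw [pv_splitOn_eq, pv_splitOn_eq, pvSplit_q a h, pvSplit_acc b]
  simp

lemma pvSplit_ne_nil (l : List Char) : ∀ cur acc, pvSplit l cur acc ≠ [] := by
  induction l with
  | nil => intro cur acc; simp [pvSplit]
  | cons c rest ih =>
    intro cur acc
    by_cases hc : c = '"'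
    · simp only [pvSplit, if_pos hc]; exact ih [] _
    · simp only [pvSplit, if_neg hc]; exact ih (c :: cur) acc

lemma pv_splitOn_ne_nil (cs : List Char) : PySem.Chars.splitOn cs ['"'] ≠ [] := by
  rw [pv_splitOn_eq]; exact pvSplit_ne_nil cs [] []

-- every string either has no quote or splits off a quote-free prefix
lemma pv_decomp (cs : List Char) (h : '"' ∈ cs) :
    ∃ a b, cs = a ++ '"' :: b ∧ '"' ∉ a := by
  refine ⟨cs.takeWhile (fun c => !(c = '"' : Bool)), (cs.dropWhile (fun c => !(c = '"' : Bool))).tail, ?_, ?_⟩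
  · have hne : cs.dropWhile (fun c => !(c = '"' : Bool)) ≠ [] := by
      intro hnil
      have := List.mem_append.mp (by
        rw [List.takeWhile_append_dropWhile (p := fun c => !(c = '"' : Bool)) (l := cs)]
        exact h)
      rcases this with h1 | h1
      · have := List.mem_takeWhile_imp h1
        simp at this
      · rw [hnil] at h1; simp at h1
    have hhead : (cs.dropWhile (fun c => !(c = '"' : Bool))).head hne = '"' := by
      have := List.head_dropWhile_not (p := fun c => !(c = '"' : Bool)) hne
      simpa using this
    conv_lhs => rw [← List.takeWhile_append_dropWhile (p := fun c => !(c = '"' : Bool)) (l := cs)]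
    congr 1
    have hct := List.cons_head_tail hne
    rw [hhead] at hct
    exact hct.symm
  · intro hmem
    have := List.mem_takeWhile_imp hmem
    simp at this

-- pvModLast rewrites the last element
lemma pvModLast_append (adj : List (List Char)) (x : List Char) :
    pvModLast (adj ++ [x]) = adj ++ [PySem.Chars.rstrip x] := by
  induction adj with
  | nil => simp [pvModLast]
  | cons y ys ih =>
    cases ys with
    | nil => simp [pvModLast]
    | cons z zs =>
      simp only [List.cons_append, pvModLast]
      rw [show z :: (zs ++ [x]) = (z :: zs) ++ [x] by simp, ih]
      simp

-- A's loop over the enumerated tail (all indices ≥ 1) computes pvTrA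
lemma pvA_loop (rest : List (List Char)) : ∀ (k : Int), 1 ≤ k →
    (∀ adj x, ((PySem.List.enumerate rest k).foldl
      (fun (st : List (List Char) × Bool) (p : Int × List Char) =>
        if !st.2 then
          ((if p.1 > 0 then pvModLast st.1 else st.1) ++ [p.2], !st.2)
        else
          (st.1 ++ [PySem.Chars.lstrip p.2], !st.2)) (adj ++ [x], false)).1
      = adj ++ pvTrA (some x) rest)
    ∧ (∀ adj, ((PySem.List.enumerate rest k).foldl
      (fun (st : List (List Char) × Bool) (p : Int × List Char) =>
        if !st.2 then
          ((if p.1 > 0 then pvModLast st.1 else st.1) ++ [p.2], !st.2)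
        else
          (st.1 ++ [PySem.Chars.lstrip p.2], !st.2)) (adj, true)).1
      = adj ++ pvTrA none rest) := by
  induction rest with
  | nil =>
    intro k hk
    constructor
    · intro adj x; simp [PySem.List.enumerate, pvTrA]
    · intro adj; simp [PySem.List.enumerate, pvTrA]
  | cons s rest ih =>
    intro k hk
    have hk1 : (1 : Int) ≤ k + 1 := by omega
    constructor
    · intro adj x
      simp only [PySem.List.enumerate, List.foldl_cons]
      have hkpos : k > 0 := by omega
      simp only [Bool.not_false, if_pos hkpos, if_true]
      rw [pvModLast_append]
      have h2 := (ih (k + 1) hk1).2 (adj ++ [PySem.Chars.rstrip x] ++ [s])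
      simp only [List.append_assoc] at h2 ⊢
      rw [h2]
      simp [pvTrA]
    · intro adj
      simp only [PySem.List.enumerate, List.foldl_cons]
      have h1 := (ih (k + 1) hk1).1 adj (PySem.Chars.lstrip s)
      simp only [Bool.not_true, Bool.false_eq_true, if_false]
      rw [h1]
      simp [pvTrA]

-- A's port computes pvAList
lemma pvA_eq (text : String) :
    adjust_spaces_around_quotes text = String.ofList (pvAList text.toList) := by
  unfold adjust_spaces_around_quotes pvAList pvTop
  obtain ⟨s0, rest, hsegs⟩ : ∃ s0 rest, PySem.Chars.splitOn text.toList ['"'] = s0 :: rest := by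
    cases hs : PySem.Chars.splitOn text.toList ['"'] with
    | nil => exact absurd hs (pv_splitOn_ne_nil _)
    | cons a b => exact ⟨a, b, rfl⟩
  rw [hsegs]
  simp only [PySem.List.enumerate, List.foldl_cons]
  have h0 : ¬ ((0 : Int) > 0) := by omega
  simp only [Bool.not_false, if_neg h0, if_true]
  have h := (pvA_loop rest (0 + 1) (by omega)).2 [s0]
  simp only [List.nil_append]
  rw [h]
  simp

-- ---- whitespace on the domain ----
lemma pv_isspace_eq (c : Char) (h : pvDomChar c = true) :
    PySem.Chars.isspace c = pvIsWS c := by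
  have hext : ∀ d : Char, (c = d) ↔ (c.toNat = d.toNat) := by
    intro d
    exact ⟨fun h => h ▸ rfl, fun hn => Char.ext (UInt32.toNat_inj.mp hn)⟩
  unfold pvDomChar at h
  simp only [pvIsWS, pvWS, List.contains_eq_mem, List.mem_cons, List.not_mem_nil, or_false,
    PySem.Chars.isspace, hext]
  simp only [Bool.or_eq_true, Bool.and_eq_true, decide_eq_true_eq, beq_iff_eq] at h
  rw [Bool.eq_iff_iff]
  simp only [Bool.or_eq_true, Bool.and_eq_true, decide_eq_true_eq,
    show (' '.toNat)=32 from rfl, show ('\t'.toNat)=9 from rfl, show ('\n'.toNat)=10 from rfl,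
    show ('\x0d'.toNat)=13 from rfl, show ('\x0b'.toNat)=11 from rfl, show ('\x0c'.toNat)=12 from rfl]
  omega

lemma pv_lstrip_eq (l : List Char) (h : ∀ c ∈ l, pvDomChar c = true) :
    PySem.Chars.lstrip l = pvLstrip l := by
  unfold PySem.Chars.lstrip pvLstrip
  induction l with
  | nil => rfl
  | cons c t ih =>
    rw [List.dropWhile_cons, List.dropWhile_cons,
      pv_isspace_eq c (h c List.mem_cons_self)]
    split
    · exact ih (fun d hd => h d (List.mem_cons_of_mem _ hd))
    · rfl

lemma pv_rstrip_eq (l : List Char) (h : ∀ c ∈ l, pvDomChar c = true) :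
    PySem.Chars.rstrip l = pvRstrip l := by
  unfold PySem.Chars.rstrip pvRstrip
  congr 1
  have h' : ∀ c ∈ l.reverse, pvDomChar c = true := fun c hc => h c (List.mem_reverse.mp hc)
  generalize l.reverse = r at h' ⊢
  induction r with
  | nil => rfl
  | cons c t ih =>
    rw [List.dropWhile_cons, List.dropWhile_cons,
      pv_isspace_eq c (h' c List.mem_cons_self)]
    split
    · exact ih (fun d hd => h' d (List.mem_cons_of_mem _ hd))
    · rfl

-- ---- pvRstrip / pvTrail facts ----
lemma pv_rstrip_trail (l : List Char) : pvRstrip l ++ pvTrail l = l := by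
  unfold pvRstrip pvTrail
  rw [← List.reverse_append, List.takeWhile_append_dropWhile, List.reverse_reverse]

lemma pv_rstrip_all_ws (l : List Char) (h : ∀ c ∈ l, pvIsWS c = true) :
    pvRstrip l = [] ∧ pvTrail l = l := by
  unfold pvRstrip pvTrail
  constructor
  · rw [List.dropWhile_eq_nil_iff.mpr (fun x hx => h x (List.mem_reverse.mp hx))]
    rfl
  · rw [List.takeWhile_eq_self_iff.mpr (fun x hx => h x (List.mem_reverse.mp hx)),
      List.reverse_reverse]

lemma pv_rstrip_append_cons (u v : List Char) (c : Char) (hc : pvIsWS c = false) :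
    pvRstrip (u ++ c :: v) = u ++ c :: pvRstrip v ∧ pvTrail (u ++ c :: v) = pvTrail v := by
  unfold pvRstrip pvTrail
  have hrev : (u ++ c :: v).reverse = v.reverse ++ c :: u.reverse := by
    simp
  have hdrop : List.dropWhile pvIsWS (v.reverse ++ c :: u.reverse)
      = List.dropWhile pvIsWS v.reverse ++ c :: u.reverse := by
    rw [List.dropWhile_append]
    split
    · next he =>
      rw [List.isEmpty_iff.mp he, List.dropWhile_cons, hc]
      simp
    · rfl
  have htake : List.takeWhile pvIsWS (v.reverse ++ c :: u.reverse)
      = List.takeWhile pvIsWS v.reverse := by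
    rw [List.takeWhile_append]
    split
    · next he =>
      have : List.takeWhile pvIsWS v.reverse = v.reverse :=
        (List.takeWhile_sublist _).eq_of_length he
      rw [List.takeWhile_cons, hc]
      simp [this]
    · rfl
  constructor
  · rw [hrev, hdrop]
    simp
  · rw [hrev, htake]

-- ---- B's machine ----
def pvBres (cs : List Char) (st : List Char × List Char × Bool × Bool) : List Char :=
  let st' := cs.foldl pvStepB st
  st'.1 ++ st'.2.1

lemma pvBres_nil (st : List Char × List Char × Bool × Bool) :
    pvBres [] st = st.1 ++ st.2.1 := rfl

lemma pvBres_cons (c : Char) (cs : List Char) (st : List Char × List Char × Bool × Bool) :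
    pvBres (c :: cs) st = pvBres cs (pvStepB st c) := rfl

lemma pvBres_append (a b : List Char) (st : List Char × List Char × Bool × Bool) :
    pvBres (a ++ b) st = pvBres b (a.foldl pvStepB st) := by
  simp [pvBres, List.foldl_append]

-- outside quotes B copies verbatim
lemma pvB_out (a : List Char) (h : '"' ∉ a) : ∀ r out pend sk,
    pvBres (a ++ r) (out, pend, false, sk) = pvBres r (out ++ a, pend, false, sk) := by
  induction a with
  | nil => intro r out pend sk; simp
  | cons c t ih =>
    intro r out pend sk
    have hc : c ≠ '"' := fun hc => h (hc ▸ List.mem_cons_self)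
    have ht : '"' ∉ t := fun hm => h (List.mem_cons_of_mem _ hm)
    rw [List.cons_append, pvBres_cons]
    have hstep : pvStepB (out, pend, false, sk) c = (out ++ [c], pend, false, sk) := by
      simp [pvStepB, hc]
    rw [hstep, ih ht]
    simp

-- inside quotes, not skipping: whitespace is buffered, the buffer flushed by non-ws
lemma pvB_in_core (s : List Char) (h : '"' ∉ s) : ∀ out pend,
    (∀ c ∈ pend, pvIsWS c = true) →
    s.foldl pvStepB (out, pend, true, false)
      = (out ++ pvRstrip (pend ++ s), pvTrail (pend ++ s), true, false) := by
  induction s with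
  | nil =>
    intro out pend hp
    obtain ⟨h1, h2⟩ := pv_rstrip_all_ws pend hp
    simp [h1, h2]
  | cons c t ih =>
    intro out pend hp
    have hc : c ≠ '"' := fun hc => h (hc ▸ List.mem_cons_self)
    have ht : '"' ∉ t := fun hm => h (List.mem_cons_of_mem _ hm)
    rw [List.foldl_cons]
    by_cases hw : pvIsWS c = true
    · have hw2 : c ∈ pvWS := by simpa [pvIsWS, List.contains_eq_mem] using hw
      have hstep : pvStepB (out, pend, true, false) c = (out, pend ++ [c], true, false) := by
        simp [pvStepB, hc, hw2]
      rw [hstep, ih ht out (pend ++ [c])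
        (fun d hd => by
          rcases List.mem_append.mp hd with hd | hd
          · exact hp d hd
          · simp at hd; exact hd ▸ hw)]
      simp
    · have hw' : pvIsWS c = false := by simpa using hw
      have hstep : pvStepB (out, pend, true, false) c = (out ++ pend ++ [c], [], true, false) := by
        simp [pvStepB, hc, pvIsWS] at hw' ⊢
        simp [hw']
      rw [hstep, ih ht (out ++ pend ++ [c]) [] (by simp)]
      obtain ⟨hr, htr⟩ := pv_rstrip_append_cons pend t c hw'
      rw [hr, htr]
      simp

-- a full inside segment, entered fresh (skipping leading whitespace)
lemma pvB_in (s : List Char) (h : '"' ∉ s) : ∀ out,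
    pvBres s (out, [], true, true) = out ++ pvLstrip s
    ∧ ∀ r, pvBres (s ++ '"' :: r) (out, [], true, true)
        = pvBres r (out ++ pvRstrip (pvLstrip s) ++ ['"'], [], false, false) := by
  induction s with
  | nil =>
    intro out
    constructor
    · simp [pvBres_nil, pvLstrip]
    · intro r
      rw [List.nil_append, pvBres_cons]
      have hstep : pvStepB (out, [], true, true) '"' = (out ++ ['"'], [], false, false) := by
        simp [pvStepB]
      rw [hstep]
      simp [pvLstrip, pvRstrip]
  | cons c t ih =>
    intro out
    have hc : c ≠ '"' := fun hc => h (hc ▸ List.mem_cons_self)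
    have ht : '"' ∉ t := fun hm => h (List.mem_cons_of_mem _ hm)
    by_cases hw : pvIsWS c = true
    · have hw2 : c ∈ pvWS := by simpa [pvIsWS, List.contains_eq_mem] using hw
      have hstep : pvStepB (out, [], true, true) c = (out, [], true, true) := by
        simp [pvStepB, hc, hw2]
      have hls : pvLstrip (c :: t) = pvLstrip t := by
        simp [pvLstrip, hw]
      constructor
      · rw [pvBres_cons, hstep, (ih ht out).1, hls]
      · intro r
        rw [List.cons_append, pvBres_cons, hstep, (ih ht out).2 r, hls]
    · have hw' : pvIsWS c = false := by simpa using hw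
      have hstep : pvStepB (out, [], true, true) c = (out ++ [c], [], true, false) := by
        simp [pvStepB, hc, pvIsWS] at hw' ⊢
        simp [hw']
      have hls : pvLstrip (c :: t) = c :: t := by
        simp [pvLstrip, hw']
      have hcore := pvB_in_core t ht (out ++ [c]) [] (by simp)
      simp only [List.nil_append] at hcore
      constructor
      · rw [pvBres_cons, hstep]
        show pvBres t (out ++ [c], [], true, false) = _
        unfold pvBres
        rw [hcore, hls]
        have := pv_rstrip_trail t
        rw [List.append_assoc, this]
        simp
      · intro r
        rw [List.cons_append, pvBres_cons, hstep, pvBres_append, hcore, pvBres_cons]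
        have hstep2 : pvStepB (out ++ [c] ++ pvRstrip t, pvTrail t, true, false) '"'
            = (out ++ [c] ++ pvRstrip t ++ ['"'], [], false, false) := by
          simp [pvStepB]
        rw [hstep2, hls]
        obtain ⟨hr, -⟩ := pv_rstrip_append_cons [] t c hw'
        simp only [List.nil_append] at hr
        rw [hr]
        simp

-- ---- main induction: B's scan produces A's segment-wise value ----
lemma pv_main (n : Nat) : ∀ cs : List Char, cs.length ≤ n →
    (∀ c ∈ cs, pvDomChar c = true) → ∀ out sk,
    pvBres cs (out, [], false, sk) = out ++ pvAList cs := by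
  induction n using Nat.strong_induction_on with
  | _ n ih =>
  intro cs hlen hdom out sk
  by_cases hq : '"' ∈ cs
  · obtain ⟨a, d, hcs, hna⟩ := pv_decomp cs hq
    subst hcs
    have hda : ∀ c ∈ a, pvDomChar c = true := fun c hc => hdom c (by simp [hc])
    rw [pvB_out a hna]
    rw [pvBres_cons]
    have hstep : pvStepB (out ++ a, [], false, sk) '"' = (out ++ a ++ ['"'], [], true, true) := by
      simp [pvStepB]
    rw [hstep]
    by_cases hqd : '"' ∈ d
    · obtain ⟨e, f, hd, hne⟩ := pv_decomp d hqd
      subst hd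
      have hde : ∀ c ∈ e, pvDomChar c = true := fun c hc => hdom c (by simp [hc])
      have hdf : ∀ c ∈ f, pvDomChar c = true := fun c hc => hdom c (by simp [hc])
      rw [(pvB_in e hne (out ++ a ++ ['"'])).2 f]
      have hflt : f.length < n := by
        have : f.length < (a ++ '"' :: (e ++ '"' :: f)).length := by simp; omega
        omega
      rw [ih f.length hflt f le_rfl hdf]
      -- now compute pvAList of the whole string
      unfold pvAList
      rw [pv_splitOn_q a _ hna, pv_splitOn_q e _ hne]
      obtain ⟨s0, tail, hsf⟩ : ∃ s0 tail, PySem.Chars.splitOn f ['"'] = s0 :: tail := by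
        cases hs : PySem.Chars.splitOn f ['"'] with
        | nil => exact absurd hs (pv_splitOn_ne_nil _)
        | cons x y => exact ⟨x, y, rfl⟩
      rw [hsf]
      show _ = out ++ PySem.Chars.join ['"']
        (a :: PySem.Chars.rstrip (PySem.Chars.lstrip e) :: s0 :: pvTrA none tail)
      rw [PySem.Chars.join_cons_cons, PySem.Chars.join_cons_cons]
      have hse : PySem.Chars.rstrip (PySem.Chars.lstrip e) = pvRstrip (pvLstrip e) := by
        rw [pv_lstrip_eq e hde, pv_rstrip_eq (pvLstrip e)
          (fun c hc => hde c (List.dropWhile_sublist _ |>.mem hc))]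
      rw [hse]
      simp [pvTop, List.append_assoc]
    · have hdd : ∀ c ∈ d, pvDomChar c = true := fun c hc => hdom c (by simp [hc])
      rw [(pvB_in d hqd (out ++ a ++ ['"'])).1]
      unfold pvAList
      rw [pv_splitOn_q a _ hna, pv_splitOn_noq d hqd]
      show _ = out ++ PySem.Chars.join ['"'] (a :: [PySem.Chars.lstrip d])
      rw [PySem.Chars.join_cons_cons, PySem.Chars.join_singleton,
        pv_lstrip_eq d hdd]
      simp [List.append_assoc]
  · rw [show cs = cs ++ [] by simp, pvB_out cs hq [] out [] sk, pvBres_nil]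
    unfold pvAList
    rw [pv_splitOn_noq _ (by simpa using hq)]
    show _ = out ++ PySem.Chars.join ['"'] [cs ++ []]
    rw [PySem.Chars.join_singleton]
    simp

-- ===== VERDICT (by name: the statement is the Claim_ definition above) =====
theorem adjust_spaces_around_quotes_spec : Claim_equal_adjust_spaces_around_quotes := by
  intro text hdom
  unfold Spec_adjust_spaces_around_quotes
  rw [pvA_eq]
  have h := pv_main text.toList.length text.toList le_rfl
    (by intro c hc; exact List.all_eq_true.mp hdom c hc) [] false
  simp only [pvBres, List.nil_append] at h
  show String.ofList (pvAList text.toList)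
      = String.ofList ((text.toList.foldl pvStepB ([], [], false, false)).1
          ++ (text.toList.foldl pvStepB ([], [], false, false)).2.1)
  rw [h]
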